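-- pv_equiv track=rewrite | github.com/Rahul-pro1/DSA_Lab | Tree Traversal/app.py | generate_postorder_traversal_steps
-- ===== SOURCE A (Python) =====
-- tree_size = 15
--
-- def generate_postorder_traversal_steps(tree_structure):
--     steps, descriptions, highlighted, traversal_result, traversal_path = [], [], [], [], []
--
--     if 0 not in tree_structure or tree_structure[0] == "":
--         steps.append(tree_structure.copy())
--         descriptions.append("Root node is empty. Please provide a value for the root (Node 0).")
--         highlighted.append([])
--         return steps, descriptions, highlighted, traversal_result, []
--
--     stack1 = [0]
--     stack2 = []
--
--     while stack1:
--         current = stack1.pop()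
--         if current >= tree_size or tree_structure.get(current, "") == "":
--             continue
--         stack2.append(current)
--
--         left = 2 * current + 1
--         right = 2 * current + 2
--         if left < tree_size:
--             stack1.append(left)
--         if right < tree_size:
--             stack1.append(right)
--
--     while stack2:
--         node = stack2.pop()
--         traversal_result.append(tree_structure[node])
--         steps.append(tree_structure.copy())
--         descriptions.append(f"Visit node {tree_structure[node]} (index {node})")
--         highlighted.append([node])
--         traversal_path.append(node)
--
--     return steps, descriptions, highlighted, traversal_result, traversal_path
-- ===== SOURCE B (Python) =====
-- tree_size = 15
--
-- def generate_postorder_traversal_steps(tree_structure):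
--     if 0 not in tree_structure or tree_structure[0] == "":
--         return ([tree_structure.copy()],
--                 ["Root node is empty. Please provide a value for the root (Node 0)."],
--                 [[]], [], [])
--
--     steps, descriptions, highlighted, traversal_result, traversal_path = [], [], [], [], []
--
--     def visit(i):
--         if i >= tree_size or tree_structure.get(i, "") == "":
--             return
--         visit(2 * i + 1)
--         visit(2 * i + 2)
--         val = tree_structure[i]
--         traversal_result.append(val)
--         steps.append(tree_structure.copy())
--         descriptions.append(f"Visit node {val} (index {i})")
--         highlighted.append([i])
--         traversal_path.append(i)
--
--     visit(0)
--     return steps, descriptions, highlighted, traversal_result, traversal_path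
-- ===== Notes on version B (the rewrite author's own statement) =====
-- stated objective: simpler
-- what changed: Replaced A's two explicit stacks (a pre-order-mirror push loop followed by a reversal-pop loop) by a single recursive postorder helper visit(i) that records each node after its children.
import Mathlib
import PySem

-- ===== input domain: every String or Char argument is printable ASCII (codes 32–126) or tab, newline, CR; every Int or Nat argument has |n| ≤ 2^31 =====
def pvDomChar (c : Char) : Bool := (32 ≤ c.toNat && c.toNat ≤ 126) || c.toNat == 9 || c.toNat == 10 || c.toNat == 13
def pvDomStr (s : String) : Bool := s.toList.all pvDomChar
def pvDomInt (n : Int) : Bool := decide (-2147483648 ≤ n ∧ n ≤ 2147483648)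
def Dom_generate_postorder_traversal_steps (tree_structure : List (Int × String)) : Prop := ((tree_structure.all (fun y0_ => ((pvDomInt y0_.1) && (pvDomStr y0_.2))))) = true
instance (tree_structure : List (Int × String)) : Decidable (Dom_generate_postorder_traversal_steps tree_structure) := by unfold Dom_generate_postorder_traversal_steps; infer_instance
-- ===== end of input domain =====

-- B replaces A's two explicit stacks (push loop + reversal-pop loop) by a single recursive
-- postorder helper; objective: simpler. Return values proved equal; neither mutates its argument.

abbrev PvSt : Type := (List (List (Int × String))) × List String × List (List Int) × List String × List Int

-- ===== PORT A =====
-- while stack1: pop / prune / push children (stack head = top; fuel 32768, proven sufficient below)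
def pvA_loop1 (ts : List (Int × String)) : Nat → List Int → List Int → List Int
  | 0, _, s2 => s2
  | _ + 1, [], s2 => s2
  | f + 1, c :: rest, s2 =>
    if 15 ≤ c ∨ PySem.Dict.getD (PySem.Dict.mk ts) c "" = "" then
      pvA_loop1 ts f rest s2
    else
      let s1 := rest
      let s1 := if 2 * c + 1 < 15 then (2 * c + 1) :: s1 else s1
      let s1 := if 2 * c + 2 < 15 then (2 * c + 2) :: s1 else s1
      pvA_loop1 ts f s1 (c :: s2)

-- while stack2: pop (= walk the Lean list, head = top) and append the five records
def pvA_loop2 (ts : List (Int × String)) : List Int → PvSt → PvSt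
  | [], st => st
  | n :: rest, st =>
    let v := PySem.Dict.getD (PySem.Dict.mk ts) n ""
    pvA_loop2 ts rest
      (st.1 ++ [ts],
       st.2.1 ++ ["Visit node " ++ v ++ " (index " ++ PySem.Int.toStr n ++ ")"],
       st.2.2.1 ++ [[n]],
       st.2.2.2.1 ++ [v],
       st.2.2.2.2 ++ [n])

def generate_postorder_traversal_steps (tree_structure : List (Int × String)) : (List (List (Int × String))) × List String × List (List Int) × List String × List Int :=
  match PySem.Dict.get? (PySem.Dict.mk tree_structure) 0 with
  | none =>
      ([tree_structure], ["Root node is empty. Please provide a value for the root (Node 0)."], [[]], [], [])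
  | some v =>
      if v = "" then
        ([tree_structure], ["Root node is empty. Please provide a value for the root (Node 0)."], [[]], [], [])
      else
        pvA_loop2 tree_structure (pvA_loop1 tree_structure 32768 [0] []) ([], [], [], [], [])

-- ===== PORT B =====
-- recursive visit(i): children first, then record node i (indices are naturals 0, 2i+1, 2i+2)
def pvB_visit (ts : List (Int × String)) (i : Nat) (st : PvSt) : PvSt :=
  if _h15 : 15 ≤ i then st
  else if PySem.Dict.getD (PySem.Dict.mk ts) (i : Int) "" = "" then st
  else
    let st := pvB_visit ts (2 * i + 1) st
    let st := pvB_visit ts (2 * i + 2) st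
    let v := PySem.Dict.getD (PySem.Dict.mk ts) (i : Int) ""
    (st.1 ++ [ts],
     st.2.1 ++ ["Visit node " ++ v ++ " (index " ++ PySem.Int.toStr (i : Int) ++ ")"],
     st.2.2.1 ++ [[(i : Int)]],
     st.2.2.2.1 ++ [v],
     st.2.2.2.2 ++ [(i : Int)])
  termination_by 15 - i
  decreasing_by all_goals omega

def generate_postorder_traversal_steps_alt (tree_structure : List (Int × String)) : (List (List (Int × String))) × List String × List (List Int) × List String × List Int :=
  match PySem.Dict.get? (PySem.Dict.mk tree_structure) 0 with
  | none =>
      ([tree_structure], ["Root node is empty. Please provide a value for the root (Node 0)."], [[]], [], [])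
  | some v =>
      if v = "" then
        ([tree_structure], ["Root node is empty. Please provide a value for the root (Node 0)."], [[]], [], [])
      else
        pvB_visit tree_structure 0 ([], [], [], [], [])

-- ===== PRECONDITION & SPEC =====
def Spec_generate_postorder_traversal_steps (tree_structure : List (Int × String)) (out : (List (List (Int × String))) × List String × List (List Int) × List String × List Int) : Prop := out = generate_postorder_traversal_steps_alt tree_structure
instance (tree_structure : List (Int × String)) (out : (List (List (Int × String))) × List String × List (List Int) × List String × List Int) : Decidable (Spec_generate_postorder_traversal_steps tree_structure out) := by unfold Spec_generate_postorder_traversal_steps; infer_instance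

-- ===== CLAIM (what is proved, stated in full; the proofs are below) =====
def Claim_equal_generate_postorder_traversal_steps : Prop := ∀ (tree_structure : List (Int × String)), Dom_generate_postorder_traversal_steps tree_structure → Spec_generate_postorder_traversal_steps tree_structure (generate_postorder_traversal_steps tree_structure)

-- ===== LEMMAS AND PROOFS =====

-- the postorder index sequence of the (pruned) subtree rooted at i
def pvPost (ts : List (Int × String)) (i : Nat) : List Int :=
  if _h15 : 15 ≤ i then []
  else if PySem.Dict.getD (PySem.Dict.mk ts) (i : Int) "" = "" then []
  else pvPost ts (2 * i + 1) ++ pvPost ts (2 * i + 2) ++ [(i : Int)]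
  termination_by 15 - i
  decreasing_by all_goals omega

-- exact number of pvA_loop1 iterations spent on the subtree rooted at i
def pvIter (ts : List (Int × String)) (i : Nat) : Nat :=
  if _h15 : 15 ≤ i then 1
  else if PySem.Dict.getD (PySem.Dict.mk ts) (i : Int) "" = "" then 1
  else if i ≤ 6 then 1 + pvIter ts (2 * i + 1) + pvIter ts (2 * i + 2)
  else 1
  termination_by 15 - i
  decreasing_by all_goals omega

theorem pvIter_le (ts : List (Int × String)) (i : Nat) : pvIter ts i ≤ 2 ^ (15 - i) := by
  rw [pvIter]
  split_ifs with h15 hempty h6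
  · exact Nat.one_le_two_pow
  · exact Nat.one_le_two_pow
  · have hl := pvIter_le ts (2 * i + 1)
    have hr := pvIter_le ts (2 * i + 2)
    have hml : 2 ^ (15 - (2 * i + 1)) ≤ 2 ^ (13 - i + 1) :=
      Nat.pow_le_pow_right (by norm_num) (by omega)
    have hmr : 2 ^ (15 - (2 * i + 2)) ≤ 2 ^ (13 - i) :=
      Nat.pow_le_pow_right (by norm_num) (by omega)
    have h15i : 15 - i = 13 - i + 2 := by omega
    have hx : 1 ≤ 2 ^ (13 - i) := Nat.one_le_two_pow
    have e1 : 2 ^ (13 - i + 1) = 2 ^ (13 - i) * 2 := by rw [pow_succ]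
    have e2 : 2 ^ (13 - i + 2) = 2 ^ (13 - i) * 4 := by rw [pow_add]; norm_num
    rw [h15i]
    omega
  · exact Nat.one_le_two_pow
  termination_by 15 - i
  decreasing_by all_goals omega

theorem pvA_loop1_nil (ts : List (Int × String)) (f : Nat) (s2 : List Int) :
    pvA_loop1 ts f [] s2 = s2 := by
  cases f <;> simp [pvA_loop1]

-- the first while-loop turns the subtree at i into its postorder sequence on stack2
theorem pvA_loop1_step (ts : List (Int × String)) (i : Nat) :
    ∀ (f : Nat) (rest s2 : List Int),
      pvA_loop1 ts (pvIter ts i + f) ((i : Int) :: rest) s2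
        = pvA_loop1 ts f rest (pvPost ts i ++ s2) := by
  intro f rest s2
  rw [pvIter, pvPost]
  by_cases h15 : 15 ≤ i
  · simp only [dif_pos h15]
    rw [show 1 + f = f + 1 from Nat.add_comm 1 f]
    rw [pvA_loop1, if_pos (Or.inl (by exact_mod_cast h15)), List.nil_append]
  · by_cases hempty : PySem.Dict.getD (PySem.Dict.mk ts) (i : Int) "" = ""
    · simp only [dif_neg h15, if_pos hempty]
      rw [show 1 + f = f + 1 from Nat.add_comm 1 f]
      rw [pvA_loop1, if_pos (Or.inr hempty), List.nil_append]
    · simp only [dif_neg h15, if_neg hempty]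
      have hcond : ¬ (15 ≤ (i : Int) ∨ PySem.Dict.getD (PySem.Dict.mk ts) (i : Int) "" = "") := by
        rintro (h | h)
        · exact h15 (by exact_mod_cast h)
        · exact hempty h
      have hcl : 2 * (i : Int) + 1 = ((2 * i + 1 : Nat) : Int) := by push_cast; ring
      have hcr : 2 * (i : Int) + 2 = ((2 * i + 2 : Nat) : Int) := by push_cast; ring
      by_cases h6 : i ≤ 6
      · have hlt1 : ((2 * i + 1 : Nat) : Int) < 15 := by push_cast; omega
        have hlt2 : ((2 * i + 2 : Nat) : Int) < 15 := by push_cast; omega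
        rw [if_pos h6]
        have hf : 1 + pvIter ts (2 * i + 1) + pvIter ts (2 * i + 2) + f
            = (pvIter ts (2 * i + 2) + (pvIter ts (2 * i + 1) + f)) + 1 := by omega
        rw [hf, pvA_loop1, if_neg hcond]
        simp only [hcl, hcr, if_pos hlt1, if_pos hlt2]
        rw [pvA_loop1_step ts (2 * i + 2), pvA_loop1_step ts (2 * i + 1)]
        simp
      · have hge1 : ¬ (((2 * i + 1 : Nat) : Int) < 15) := by push_cast; omega
        have hge2 : ¬ (((2 * i + 2 : Nat) : Int) < 15) := by push_cast; omega
        rw [if_neg h6]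
        rw [show 1 + f = f + 1 from Nat.add_comm 1 f]
        rw [pvA_loop1, if_neg hcond]
        simp only [hcl, hcr, if_neg hge1, if_neg hge2]
        have hpl : pvPost ts (2 * i + 1) = [] := by rw [pvPost]; rw [dif_pos (by omega)]
        have hpr : pvPost ts (2 * i + 2) = [] := by rw [pvPost]; rw [dif_pos (by omega)]
        rw [hpl, hpr]
        simp
  termination_by 15 - i
  decreasing_by all_goals omega

theorem pvA_loop2_append (ts : List (Int × String)) (xs ys : List Int) (st : PvSt) :
    pvA_loop2 ts (xs ++ ys) st = pvA_loop2 ts ys (pvA_loop2 ts xs st) := by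
  induction xs generalizing st with
  | nil => rfl
  | cons n rest ih => simp [pvA_loop2, ih]

-- replaying the postorder sequence through the second while-loop is exactly B's recursion
theorem pvA_loop2_post (ts : List (Int × String)) (i : Nat) :
    ∀ st : PvSt, pvA_loop2 ts (pvPost ts i) st = pvB_visit ts i st := by
  intro st
  rw [pvPost, pvB_visit]
  by_cases h15 : 15 ≤ i
  · simp only [dif_pos h15]; rfl
  · by_cases hempty : PySem.Dict.getD (PySem.Dict.mk ts) (i : Int) "" = ""
    · simp only [dif_neg h15, if_pos hempty]; rfl
    · simp only [dif_neg h15, if_neg hempty]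
      rw [pvA_loop2_append, pvA_loop2_append,
        pvA_loop2_post ts (2 * i + 1) st, pvA_loop2_post ts (2 * i + 2)]
      rfl
  termination_by 15 - i
  decreasing_by all_goals omega

theorem pvA_loop1_top (ts : List (Int × String)) :
    pvA_loop1 ts 32768 [(0 : Int)] [] = pvPost ts 0 := by
  have hle : pvIter ts 0 ≤ 32768 := by
    have := pvIter_le ts 0
    norm_num at this
    omega
  have h := pvA_loop1_step ts 0 (32768 - pvIter ts 0) [] []
  rw [Nat.add_sub_cancel' hle] at h
  simpa [pvA_loop1_nil] using h

-- ===== VERDICT (by name: the statement is the Claim_ definition above) =====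
theorem generate_postorder_traversal_steps_spec : Claim_equal_generate_postorder_traversal_steps := by
  intro ts _
  unfold Spec_generate_postorder_traversal_steps
  unfold generate_postorder_traversal_steps generate_postorder_traversal_steps_alt
  cases PySem.Dict.get? (PySem.Dict.mk ts) 0 with
  | none => rfl
  | some v =>
    by_cases hv : v = ""
    · simp [hv]
    · simp only [if_neg hv]
      rw [pvA_loop1_top, pvA_loop2_post]
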